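-- pv_equiv track=rewrite | github.com/ProsperousRF/foobar.withgoogle.com | doomsday-fuel/src/solution.py | subtract_q_from_identity
-- ===== SOURCE A (Python) =====
-- def subtract_q_from_identity(q):
--     """
--     If Q = [
--         [1,2,3],
--         [4,5,6],
--         [7,8,9],
--     ]
--     I - Q:
--     [[1,0,0]            [[0,-2,-3]
--      [0,1,0]   - Q =     [-4,-4,-6]
--      [0,0,1]]            [-7,-8,-8]]
--     """
--
--     for row in range(len(q)):
--         for item in range(len(q[row])):
--             if row == item:
--                 q[row][item] = 1 - q[row][item]
--             else:
--                 q[row][item] = -q[row][item]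
--     return q
-- ===== SOURCE B (Python) =====
-- def subtract_q_from_identity(q):
--     # Staged algorithm: first explicitly construct the identity matrix shaped
--     # like q (a row of zeros with a 1 placed at the diagonal position, when it
--     # exists in a ragged row), then perform a generic elementwise matrix
--     # subtraction I - Q via zip.  No per-cell diagonal branch, no mutation of q.
--     ident = []
--     for i, row in enumerate(q):
--         e = [0] * len(row)
--         if i < len(row):
--             e[i] = 1
--         ident.append(e)
--     return [[a - b for a, b in zip(er, qr)] for er, qr in zip(ident, q)]
-- ===== Notes on version B (the rewrite author's own statement) =====
-- stated objective: alternative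
-- what changed: Instead of one in-place pass with an i==j branch per cell, B materialises the identity matrix shaped like q (zero row with a guarded 1 on the diagonal) and then subtracts the two matrices elementwise with zip, removing the per-cell branch; A mutates q in place while B returns a fresh list (return values are identical).
import Mathlib
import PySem

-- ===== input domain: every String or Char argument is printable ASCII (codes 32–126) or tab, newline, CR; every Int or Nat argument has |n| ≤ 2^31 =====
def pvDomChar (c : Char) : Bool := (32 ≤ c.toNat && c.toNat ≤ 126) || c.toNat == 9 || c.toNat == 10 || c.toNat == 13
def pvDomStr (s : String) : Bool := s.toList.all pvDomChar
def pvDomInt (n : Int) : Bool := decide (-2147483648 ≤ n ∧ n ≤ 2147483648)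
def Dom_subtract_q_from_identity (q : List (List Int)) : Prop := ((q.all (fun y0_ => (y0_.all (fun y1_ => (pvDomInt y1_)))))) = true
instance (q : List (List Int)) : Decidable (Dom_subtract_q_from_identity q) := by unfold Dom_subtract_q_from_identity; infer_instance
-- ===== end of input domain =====

-- ===== PORT A =====
-- B differs from A in side effects: A mutates q in place, B builds fresh lists;
-- the equivalence proved here is about the RETURN value only.
-- Port of A: for row in range(len(q)): for item in range(len(q[row])): q[row][item] = ...
def subtract_q_from_identity (q : List (List Int)) : List (List Int) :=
  (PySem.List.pyRange 0 (q.length : Int) 1).foldl (fun m row =>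
    (PySem.List.pyRange 0 ((PySem.List.pyGetD m row []).length : Int) 1).foldl (fun m' item =>
      let rw := PySem.List.pyGetD m' row []
      let v : Int :=
        if row = item then 1 - PySem.List.pyGetD rw item 0
        else -(PySem.List.pyGetD rw item 0)
      PySem.List.pySetD m' row (PySem.List.pySetD rw item v)) m) q

-- ===== PORT B =====
-- Port of B: build the identity matrix shaped like q (zero row with a guarded
-- 1 at the diagonal), then subtract the matrices elementwise with zip.
def subtract_q_from_identity_alt (q : List (List Int)) : List (List Int) :=
  let ident : List (List Int) :=
    q.mapIdx (fun i row =>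
      let e : List Int := List.replicate row.length 0
      if i < row.length then e.set i 1 else e)
  (ident.zip q).map (fun p => (p.1.zip p.2).map (fun c => c.1 - c.2))

-- ===== PRECONDITION & SPEC =====
def Spec_subtract_q_from_identity (q : List (List Int)) (out : List (List Int)) : Prop := out = subtract_q_from_identity_alt q
instance (q : List (List Int)) (out : List (List Int)) : Decidable (Spec_subtract_q_from_identity q out) := by unfold Spec_subtract_q_from_identity; infer_instance

-- ===== CLAIM (what is proved, stated in full; the proofs are below) =====
def Claim_equal_subtract_q_from_identity : Prop := ∀ (q : List (List Int)), Dom_subtract_q_from_identity q → Spec_subtract_q_from_identity q (subtract_q_from_identity q)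

-- ===== LEMMAS AND PROOFS =====

-- Helper names for the proof: the two step functions of port A, and the row transform.
def pvGRow (r : Nat) (rw : List Int) : List Int :=
  rw.mapIdx (fun j x => (if r = j then (1 : Int) else 0) - x)

def pvAstepIn (row : Int) (m' : List (List Int)) (item : Int) : List (List Int) :=
  let rw := PySem.List.pyGetD m' row []
  let v : Int :=
    if row = item then 1 - PySem.List.pyGetD rw item 0
    else -(PySem.List.pyGetD rw item 0)
  PySem.List.pySetD m' row (PySem.List.pySetD rw item v)

def pvAstepOut (m : List (List Int)) (row : Int) : List (List Int) :=
  (PySem.List.pyRange 0 ((PySem.List.pyGetD m row []).length : Int) 1).foldl (pvAstepIn row) m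

-- "mix out rw k" = first k entries already transformed, rest still original.
lemma pvMixLen {a : Type} (out rw : List a) (k : Nat) (hlen : out.length = rw.length)
    (hk : k <= rw.length) : (out.take k ++ rw.drop k).length = rw.length := by
  simp; omega

lemma pvMixGet {a : Type} (out rw : List a) (k i : Nat) (hlen : out.length = rw.length)
    (hk : k <= rw.length) (hi : i < (out.take k ++ rw.drop k).length) :
    (out.take k ++ rw.drop k)[i] = if h : i < k then out[i]'(by omega) else rw[i]'(by simp at hi; omega) := by
  rcases Nat.lt_or_ge i k with h | h
  · rw [List.getElem_append_left (by simp; omega)]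
    simp [List.getElem_take, h]
  · rw [List.getElem_append_right (by simp; omega)]
    have hi' : i < rw.length := by simp at hi; omega
    simp [List.getElem_drop]
    rw [dif_neg (by omega)]
    congr 1
    omega

lemma pvMixSet {a : Type} (out rw : List a) (k : Nat) (hlen : out.length = rw.length)
    (hk : k < rw.length) (v : a) (hv : v = out[k]'(by omega)) :
    (out.take k ++ rw.drop k).set k v = out.take (k + 1) ++ rw.drop (k + 1) := by
  apply List.ext_getElem
  · rw [List.length_set, pvMixLen out rw k hlen (by omega), pvMixLen out rw (k+1) hlen (by omega)]
  · intro i h1 h2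
    rw [List.getElem_set]
    have hlen1 : (out.take k ++ rw.drop k).length = rw.length := pvMixLen out rw k hlen (by omega)
    have hlen2 : (out.take (k+1) ++ rw.drop (k+1)).length = rw.length := pvMixLen out rw (k+1) hlen (by omega)
    rw [pvMixGet out rw (k+1) i hlen (by omega) (by omega)]
    split_ifs with h3 h4 h4
    · subst h3; rw [hv]
    · omega
    · rw [pvMixGet out rw k i hlen (by omega) (by omega), dif_pos (by omega)]
    · rw [pvMixGet out rw k i hlen (by omega) (by omega), dif_neg (by omega)]

-- The inner loop of A transforms row r of the matrix into pvGRow r (m[r]).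
lemma pvInnerLoop (m : List (List Int)) (r : Nat) (hr : r < m.length) :
    ∀ (k : Nat), k <= (m[r]).length →
      ((List.range k).map (fun j : Nat => (j : Int))).foldl (pvAstepIn (r : Int)) m
        = m.set r ((pvGRow r m[r]).take k ++ (m[r]).drop k) := by
  have hlen : (pvGRow r m[r]).length = (m[r]).length := by simp [pvGRow]
  intro k
  induction k with
  | zero =>
    intro _
    simp [List.set_getElem_self]
  | succ k ih =>
    intro hk
    rw [List.range_succ, List.map_append, List.foldl_append, ih (by omega)]
    simp only [List.map_cons, List.map_nil, List.foldl_cons, List.foldl_nil]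
    have hptlen : ((pvGRow r m[r]).take k ++ (m[r]).drop k).length = (m[r]).length :=
      pvMixLen _ _ _ hlen (by omega)
    have hget : PySem.List.pyGetD (m.set r ((pvGRow r m[r]).take k ++ (m[r]).drop k)) (r : Int) []
        = (pvGRow r m[r]).take k ++ (m[r]).drop k := by
      rw [PySem.List.pyGetD_natCast, List.getD_eq_getElem _ _ (by simp; omega),
        List.getElem_set_self]
    have hitem : PySem.List.pyGetD ((pvGRow r m[r]).take k ++ (m[r]).drop k) (k : Int) 0
        = (m[r])[k]'(by omega) := by
      rw [PySem.List.pyGetD_natCast, List.getD_eq_getElem _ _ (by rw [hptlen]; omega),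
        pvMixGet _ _ _ _ hlen (by omega) (by rw [hptlen]; omega), dif_neg (by omega)]
    rw [pvAstepIn, hget, hitem, PySem.List.pySetD_natCast, PySem.List.pySetD_natCast,
      List.set_set]
    congr 1
    apply pvMixSet _ _ _ hlen (by omega)
    simp only [pvGRow, List.getElem_mapIdx, Nat.cast_inj]
    split_ifs with h
    · ring
    · ring

-- One outer step of A: row r of the matrix gets replaced by pvGRow r (m[r]).
lemma pvRowStep (m : List (List Int)) (r : Nat) (hr : r < m.length) :
    pvAstepOut m (r : Int) = m.set r (pvGRow r (m[r])) := by
  have hget : PySem.List.pyGetD m (r : Int) [] = m[r] := by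
    rw [PySem.List.pyGetD_natCast, List.getD_eq_getElem _ _ hr]
  rw [pvAstepOut, hget, PySem.List.pyRange_zero_natCast,
    pvInnerLoop m r hr (m[r]).length (le_refl _)]
  congr 1
  rw [List.take_of_length_le (by simp [pvGRow]), List.drop_length, List.append_nil]

-- The outer loop of A, after k rows, equals pvGRow applied to the first k rows.
lemma pvOuterLoop (q : List (List Int)) :
    ∀ (k : Nat), k <= q.length →
      ((List.range k).map (fun i : Nat => (i : Int))).foldl pvAstepOut q
        = (q.mapIdx pvGRow).take k ++ q.drop k := by
  have hlen : (q.mapIdx pvGRow).length = q.length := by simp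
  intro k
  induction k with
  | zero => intro _; simp
  | succ k ih =>
    intro hk
    rw [List.range_succ, List.map_append, List.foldl_append, ih (by omega)]
    simp only [List.map_cons, List.map_nil, List.foldl_cons, List.foldl_nil]
    set pt := (q.mapIdx pvGRow).take k ++ q.drop k with hpt
    have hptlen : pt.length = q.length := pvMixLen _ _ _ hlen (by omega)
    have hk' : k < pt.length := by omega
    rw [pvRowStep pt k hk']
    have hrow : pt[k]'hk' = q[k]'(by omega) := by
      rw [pvMixGet _ _ _ _ hlen (by omega) hk', dif_neg (by omega)]
    rw [hrow]
    apply pvMixSet _ _ _ hlen (by omega)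
    rw [List.getElem_mapIdx]

-- B's identity row: the guarded set on a zero row.
def pvIdRow (i : Nat) (row : List Int) : List Int :=
  let e : List Int := List.replicate row.length 0
  if i < row.length then e.set i 1 else e

lemma pvIdRowLen (i : Nat) (row : List Int) : (pvIdRow i row).length = row.length := by
  unfold pvIdRow; split_ifs <;> simp

lemma pvIdRowGet (i j : Nat) (row : List Int) (hj : j < (pvIdRow i row).length) :
    (pvIdRow i row)[j] = if i = j then (1 : Int) else 0 := by
  have hj' : j < row.length := by rw [pvIdRowLen] at hj; exact hj
  unfold pvIdRow
  split_ifs with h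
  · simp only [List.getElem_set, List.getElem_replicate]
  · have hij : i ≠ j := by omega
    simp [hij]

-- B's zip-based subtraction of the identity row equals pvGRow.
lemma pvZipRow (i : Nat) (row : List Int) :
    ((pvIdRow i row).zip row).map (fun c => c.1 - c.2) = pvGRow i row := by
  apply List.ext_getElem
  · simp [pvGRow, pvIdRowLen]
  · intro j h1 h2
    have hj : j < row.length := by simp [pvGRow] at h2; exact h2
    simp only [List.getElem_map, List.getElem_zip, pvGRow, List.getElem_mapIdx]
    rw [pvIdRowGet i j row (by rw [pvIdRowLen]; exact hj)]

-- B's whole computation equals q.mapIdx pvGRow.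
lemma pvAltEq (q : List (List Int)) :
    subtract_q_from_identity_alt q = q.mapIdx pvGRow := by
  unfold subtract_q_from_identity_alt
  have hident : q.mapIdx (fun i row =>
      let e : List Int := List.replicate row.length 0
      if i < row.length then e.set i 1 else e) = q.mapIdx pvIdRow := rfl
  rw [hident]
  apply List.ext_getElem
  · simp
  · intro j h1 h2
    have hq : j < q.length := by simpa using h2
    simp only [List.getElem_map, List.getElem_zip, List.getElem_mapIdx]
    exact pvZipRow j q[j]

-- ===== VERDICT (by name: the statement is the Claim_ definition above) =====
theorem subtract_q_from_identity_spec : Claim_equal_subtract_q_from_identity := by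
  intro q _
  show subtract_q_from_identity q = subtract_q_from_identity_alt q
  have h : subtract_q_from_identity q
      = (PySem.List.pyRange 0 (q.length : Int) 1).foldl pvAstepOut q := rfl
  rw [h, PySem.List.pyRange_zero_natCast, pvOuterLoop q q.length (le_refl _)]
  rw [List.take_of_length_le (by simp), List.drop_length, List.append_nil, pvAltEq]
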